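-- pv_equiv track=rewrite | github.com/tensorflow/autograph | reference_tests/loop_control_flow_test.py | break_in_inner_for
-- ===== SOURCE A (Python) =====
-- def break_in_inner_for(m):
--   s = 0
--   for l in m:
--     for c in l:
--       if c % 2 > 0:
--         break
--       s += c
--   return s
-- ===== SOURCE B (Python) =====
-- def break_in_inner_for(m):
--   total = 0
--   for l in m:
--     flags = [c % 2 != 0 for c in l]
--     cut = flags.index(True) if True in flags else len(flags)
--     total += sum(l[:cut])
--   return total
-- ===== Notes on version B (the rewrite author's own statement) =====
-- stated objective: alternative
-- what changed: Per row B does staged full passes - build a parity flag list, locate the first odd position with list.index, then sum a slice up to it - instead of A's single short-circuiting inner loop with break.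
import Mathlib
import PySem

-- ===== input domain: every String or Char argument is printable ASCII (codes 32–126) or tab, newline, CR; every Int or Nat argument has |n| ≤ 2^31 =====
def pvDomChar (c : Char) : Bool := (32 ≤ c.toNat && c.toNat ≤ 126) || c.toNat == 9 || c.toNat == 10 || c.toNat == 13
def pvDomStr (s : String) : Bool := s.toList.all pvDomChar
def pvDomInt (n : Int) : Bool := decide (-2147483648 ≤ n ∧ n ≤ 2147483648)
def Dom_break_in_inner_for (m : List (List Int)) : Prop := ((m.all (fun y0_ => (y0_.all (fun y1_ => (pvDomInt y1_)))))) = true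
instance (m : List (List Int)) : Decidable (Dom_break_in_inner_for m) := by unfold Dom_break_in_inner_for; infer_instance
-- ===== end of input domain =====

-- B replaces A's short-circuiting inner loop with staged full passes per row (parity flags, first-odd index, slice sum); alternative, same result.

-- ===== PORT A =====
-- inner 'for c in l: if c % 2 > 0: break; s += c', threading the running sum s
def innerA (s : Int) (l : List Int) : Int :=
  match l with
  | [] => s
  | c :: rest => if PySem.Int.mod c 2 > 0 then s else innerA (s + c) rest

def break_in_inner_for (m : List (List Int)) : Int :=
  m.foldl innerA 0

-- ===== PORT B =====
-- flags = [c % 2 != 0 for c in l]; cut = flags.index(True) if True in flags else len(flags); sum(l[:cut])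
def rowB (l : List Int) : Int :=
  let flags := l.map (fun c => PySem.Int.mod c 2 != 0)
  let cut : Int :=
    if flags.contains true then ((PySem.List.index? flags true).getD 0 : Nat)
    else (flags.length : Int)
  (PySem.List.slice l none (some cut)).sum

def break_in_inner_for_alt (m : List (List Int)) : Int :=
  m.foldl (fun total l => total + rowB l) 0

-- ===== PRECONDITION & SPEC =====
def Spec_break_in_inner_for (m : List (List Int)) (out : Int) : Prop := out = break_in_inner_for_alt m
instance (m : List (List Int)) (out : Int) : Decidable (Spec_break_in_inner_for m out) := by unfold Spec_break_in_inner_for; infer_instance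

-- ===== CLAIM (what is proved, stated in full; the proofs are below) =====
def Claim_equal_break_in_inner_for : Prop := ∀ (m : List (List Int)), Dom_break_in_inner_for m → Spec_break_in_inner_for m (break_in_inner_for m)

-- ===== LEMMAS AND PROOFS =====
-- the cut position B computes, as a Nat (proof helper)
def cutNat (l : List Int) : Nat :=
  match PySem.List.index? (l.map (fun c => PySem.Int.mod c 2 != 0)) true with
  | some k => k
  | none => l.length

theorem cutNat_cons (c : Int) (rest : List Int) :
    cutNat (c :: rest) = if c % 2 = 0 then cutNat rest + 1 else 0 := by
  rcases Int.emod_two_eq_zero_or_one c with h | h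
  · have hf : (PySem.Int.mod c 2 != 0) = false := by simp [h]
    unfold cutNat
    rw [List.map_cons, hf,
      show PySem.List.index? (false :: rest.map (fun c => PySem.Int.mod c 2 != 0)) true
          = (PySem.List.index? (rest.map (fun c => PySem.Int.mod c 2 != 0)) true).map (· + 1)
        from PySem.List.index?_cons_of_ne _ (by simp)]
    cases hidx : PySem.List.index? (rest.map (fun c => PySem.Int.mod c 2 != 0)) true with
    | none => simp [h]
    | some k => simp [h]
  · have hf : (PySem.Int.mod c 2 != 0) = true := by simp [h]
    unfold cutNat
    rw [List.map_cons, hf, PySem.List.index?_cons_self]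
    simp [h]

theorem take_cutNat (l : List Int) :
    l.take (cutNat l) = l.takeWhile (fun c => PySem.Int.mod c 2 == 0) := by
  induction l with
  | nil => simp [cutNat]
  | cons c rest ih =>
    rw [cutNat_cons]
    rcases Int.emod_two_eq_zero_or_one c with h | h
    · simp [h, List.takeWhile, ih]
    · simp [h, List.takeWhile]

theorem rowB_eq (l : List Int) :
    rowB l = (l.takeWhile (fun c => PySem.Int.mod c 2 == 0)).sum := by
  unfold rowB
  rw [← take_cutNat]
  have hcut : (if (l.map (fun c => PySem.Int.mod c 2 != 0)).contains true then
      (((PySem.List.index? (l.map (fun c => PySem.Int.mod c 2 != 0)) true).getD 0 : Nat) : Int)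
    else ((l.map (fun c => PySem.Int.mod c 2 != 0)).length : Int)) = (cutNat l : Int) := by
    unfold cutNat
    cases hidx : PySem.List.index? (l.map (fun c => PySem.Int.mod c 2 != 0)) true with
    | none =>
      have hmem : true ∉ (l.map (fun c => PySem.Int.mod c 2 != 0)) :=
        (PySem.List.index?_eq_none_iff _ _).mp hidx
      have hc : (l.map (fun c => PySem.Int.mod c 2 != 0)).contains true = false := by
        rw [List.contains_eq_mem]; exact decide_eq_false hmem
      rw [hc]; simp
    | some k =>
      have hmem : true ∈ (l.map (fun c => PySem.Int.mod c 2 != 0)) :=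
        (PySem.List.index?_isSome_iff _ _).mp (by rw [hidx]; rfl)
      have hc : (l.map (fun c => PySem.Int.mod c 2 != 0)).contains true = true := by
        rw [List.contains_eq_mem]; exact decide_eq_true hmem
      rw [hc]; simp
  simp only [hcut, PySem.List.slice_to_natCast]

theorem innerA_eq (l : List Int) (s : Int) :
    innerA s l = s + (l.takeWhile (fun c => PySem.Int.mod c 2 == 0)).sum := by
  induction l generalizing s with
  | nil => simp [innerA]
  | cons c rest ih =>
    rcases Int.emod_two_eq_zero_or_one c with h | h
    · simp [innerA, List.takeWhile, h, ih]; ring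
    · simp [innerA, List.takeWhile, h]

theorem folds_eq (m : List (List Int)) (s : Int) :
    m.foldl innerA s = m.foldl (fun total l => total + rowB l) s := by
  induction m generalizing s with
  | nil => rfl
  | cons l rest ih => simp only [List.foldl, innerA_eq, rowB_eq, ih]

-- ===== VERDICT (by name: the statement is the Claim_ definition above) =====
theorem break_in_inner_for_spec : Claim_equal_break_in_inner_for := by
  intro m _
  unfold Spec_break_in_inner_for break_in_inner_for break_in_inner_for_alt
  exact folds_eq m 0
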